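-- pv_equiv track=rewrite | github.com/rafifalzr/Ravel_knit_words | EXAM3.py | ravel
-- ===== SOURCE A (Python) =====
-- def ravel(y) :
--     listy = list(y)
--     jum = len(listy)
--     list_ravel = []
--     for i in range(jum) :
--         x = listy[0:i+1]
--         list_ravel.append(x)
--     # new = "".join(list_ravel) ## join error
--     # return new
--     return list_ravel
-- ===== SOURCE B (Python) =====
-- def ravel(y):
--     cur = []
--     result = []
--     for e in y:
--         cur.append(e)
--         result.append(list(cur))
--     return result
-- ===== Notes on version B (the rewrite author's own statement) =====
-- stated objective: alternative
-- what changed: B builds each prefix incrementally by appending the current element to a running list and storing a fresh copy, instead of re-slicing listy[0:i+1] over an index range.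
import Mathlib
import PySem

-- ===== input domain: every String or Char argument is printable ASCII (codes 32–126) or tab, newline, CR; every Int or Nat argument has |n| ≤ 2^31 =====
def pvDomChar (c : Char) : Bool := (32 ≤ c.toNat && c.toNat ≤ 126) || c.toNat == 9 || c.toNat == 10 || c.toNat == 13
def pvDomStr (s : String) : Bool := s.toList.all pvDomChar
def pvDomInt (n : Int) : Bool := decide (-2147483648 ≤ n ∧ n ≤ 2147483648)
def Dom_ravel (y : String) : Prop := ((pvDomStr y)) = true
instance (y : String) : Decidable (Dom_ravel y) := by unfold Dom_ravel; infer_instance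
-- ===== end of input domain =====

-- B builds each prefix incrementally with a running accumulator instead of
-- re-slicing listy[0:i+1] for each index (alternative decomposition, same cost).


-- ===== PORT A =====
-- listy = list(y); for i in range(jum): list_ravel.append(listy[0:i+1])
def ravel (y : String) : List (List String) :=
  let listy : List String := y.toList.map (fun c => String.ofList [c])
  let jum : Int := listy.length
  (PySem.List.pyRange 0 jum 1).foldl
    (fun list_ravel i => list_ravel ++ [PySem.List.slice listy (some 0) (some (i + 1))]) []

-- ===== PORT B =====
-- cur = []; result = []; for e in y: cur.append(e); result.append(list(cur))
def ravel_alt (y : String) : List (List String) :=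
  (y.toList.map (fun c => String.ofList [c])).foldl
    (fun st e =>
      let cur := st.1 ++ [e]
      (cur, st.2 ++ [cur]))
    (([] : List String), ([] : List (List String)))
  |>.2

-- ===== PRECONDITION & SPEC =====
def Spec_ravel (y : String) (out : List (List String)) : Prop := out = ravel_alt y
instance (y : String) (out : List (List String)) : Decidable (Spec_ravel y out) := by unfold Spec_ravel; infer_instance

-- ===== CLAIM (what is proved, stated in full; the proofs are below) =====
def Claim_equal_ravel : Prop := ∀ (y : String), Dom_ravel y → Spec_ravel y (ravel y)

-- ===== LEMMAS AND PROOFS =====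

-- B's accumulator loop, characterised: starting from (cur, res) over l it returns
-- res followed by the prefixes cur ++ l.take (k+1).
theorem ravel_alt_loop (l : List String) (cur : List String) (res : List (List String)) :
    (l.foldl (fun st e => let c := st.1 ++ [e]; (c, st.2 ++ [c])) (cur, res)).2
      = res ++ (List.range l.length).map (fun k => cur ++ l.take (k + 1)) := by
  induction l generalizing cur res with
  | nil => simp
  | cons a t ih =>
      simp only [List.foldl_cons, List.length_cons, List.range_succ_eq_map, List.map_cons,
        List.map_map]
      rw [ih]
      simp [List.append_assoc, Function.comp_def]

theorem ravel_spec_aux (y : String) : ravel y = ravel_alt y := by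
  unfold ravel ravel_alt
  dsimp only
  set listy : List String := y.toList.map (fun c => String.ofList [c]) with hlisty
  rw [show (listy.length : Int) = ((listy.length : Nat) : Int) from rfl,
    PySem.List.pyRange_zero_nat, List.foldl_map,
    PySem.List.foldl_append_singleton_eq_map, ravel_alt_loop]
  simp only [List.nil_append]
  apply List.map_congr_left
  intro k hk
  have : ((k : Int) + 1) = ((k + 1 : Nat) : Int) := by push_cast; ring
  rw [this, PySem.List.slice_zero_start, PySem.List.slice_to_natCast]

-- ===== VERDICT (by name: the statement is the Claim_ definition above) =====
theorem ravel_spec : Claim_equal_ravel := by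
  intro y _
  exact ravel_spec_aux y
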